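-- pv_equiv track=rewrite | github.com/SeanDF333/Frontier-Engineering | benchmarks/MolecularMechanics/weighted_parameter_coverage/verification/evaluate.py | individual_feature_count_selection
-- ===== SOURCE A (Python) =====
-- def individual_feature_count_selection(budget: int, candidates: dict[str, set[str]]) -> list[str]:
--     ranked = sorted(
--         candidates.items(),
--         key=lambda item: (-len(item[1]), item[0]),
--     )
--     selected = [candidate_id for candidate_id, _ in ranked[:budget]]
--     selected.sort()
--     return selected
-- ===== SOURCE B (Python) =====
-- def individual_feature_count_selection(budget: int, candidates: dict[str, set[str]]) -> list[str]:
--     buckets = {}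
--     for cid, feats in candidates.items():
--         buckets.setdefault(len(feats), []).append(cid)
--     count = max(0, min(budget, len(candidates)))
--     picked = []
--     for size in sorted(buckets, reverse=True):
--         if len(picked) >= count:
--             break
--         ids = sorted(buckets[size])
--         picked.extend(ids[:count - len(picked)])
--     return sorted(picked)
-- ===== Notes on version B (the rewrite author's own statement) =====
-- stated objective: alternative
-- what changed: B buckets candidate ids by feature-set size and greedily takes ids (sizes descending, ids ascending) until the budget count (clamped to [0, len]) is reached, instead of sorting all candidates by a (-size, id) tuple key and slicing; Pre_ only excludes association lists with duplicate candidate ids, which cannot arise from a Python dict.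
-- intended difference: On budget < 0 with 0 < len(candidates)+budget, A's slice ranked[:budget] silently drops only the last |budget| ranked candidates (Python negative-slice wraparound) and returns a non-empty selection; B treats budget as a selection count and returns [], the intended value for a non-positive budget. — e.g. on individual_feature_count_selection(-1, [("a", ["x"]), ("b", [])]): A returns ["a"], B returns []
import Mathlib
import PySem

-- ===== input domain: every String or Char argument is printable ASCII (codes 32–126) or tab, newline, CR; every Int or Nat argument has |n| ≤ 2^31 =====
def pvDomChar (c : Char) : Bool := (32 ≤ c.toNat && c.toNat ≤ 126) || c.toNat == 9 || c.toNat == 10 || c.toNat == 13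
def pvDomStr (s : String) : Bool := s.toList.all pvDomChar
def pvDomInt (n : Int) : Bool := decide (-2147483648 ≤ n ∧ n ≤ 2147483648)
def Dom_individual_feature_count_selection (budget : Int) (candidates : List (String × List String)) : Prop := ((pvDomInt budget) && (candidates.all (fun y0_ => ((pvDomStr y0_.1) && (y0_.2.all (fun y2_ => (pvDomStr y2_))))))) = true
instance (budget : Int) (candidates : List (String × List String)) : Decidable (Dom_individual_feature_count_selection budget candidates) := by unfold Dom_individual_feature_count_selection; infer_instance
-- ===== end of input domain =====

-- B buckets ids by feature-set size and takes greedily from the largest size instead of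
-- sorting all candidates by a tuple key and slicing; on negative budgets B intentionally
-- selects nothing where A's negative slice returns a non-empty tail-truncated selection (see D_).

-- len(feats) of a Python set, represented as its list of distinct elements
def pvSetLen (feats : List String) : Int := ((PySem.Set.ofList feats).length : Int)

-- ===== PORT A =====
def individual_feature_count_selection (budget : Int) (candidates : List (String × List String)) : List String :=
  let ranked := PySem.List.sorted2 candidates (fun it => -(pvSetLen it.2)) (fun it => it.1) false
  let selected := (PySem.List.slice ranked none (some budget)).map (fun it => it.1)
  PySem.List.sorted selected (fun x => x) false

-- ===== PORT B =====
-- buckets.setdefault(size, []).append(cid): ported as Dict.modify, whose items effect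
-- (append [] bucket if the key is new, then append the id to it) is exactly setdefault+append
def pvBuckets (candidates : List (String × List String)) : PySem.Dict Int (List String) :=
  candidates.foldl (fun d it => d.modify (pvSetLen it.2) [] (fun v => v ++ [it.1])) PySem.Dict.empty

-- the 'for size in sorted(buckets, reverse=True)' loop with its break
def pvPickLoop (d : PySem.Dict Int (List String)) (count : Int) : List Int → List String → List String
  | [], picked => picked
  | s :: rest, picked =>
      if count ≤ (picked.length : Int) then picked
      else
        let ids := PySem.List.sorted (d.getD s []) (fun x => x) false
        pvPickLoop d count rest (picked ++ PySem.List.slice ids none (some (count - (picked.length : Int))))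

def individual_feature_count_selection_alt (budget : Int) (candidates : List (String × List String)) : List String :=
  let d := pvBuckets candidates
  let count := max 0 (min budget (candidates.length : Int))
  let picked := pvPickLoop d count (PySem.List.sorted d.keys (fun x => x) true) []
  PySem.List.sorted picked (fun x => x) false

-- ===== PRECONDITION & SPEC =====
-- Pre_ excludes association lists with duplicate candidate ids: a Python dict cannot
-- contain a duplicate key, so such lists represent no actual input of A.
def Pre_individual_feature_count_selection (budget : Int) (candidates : List (String × List String)) : Prop :=
  (candidates.map Prod.fst).Nodup
instance (budget : Int) (candidates : List (String × List String)) : Decidable (Pre_individual_feature_count_selection budget candidates) := by unfold Pre_individual_feature_count_selection; infer_instance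

def pvWitness_individual_feature_count_selection : Int × (List (String × List String)) :=
  (2, [("a", ["x"]), ("b", [])])

-- On budget < 0 with 0 < len(candidates)+budget, A's slice ranked[:budget] silently drops only
-- the last |budget| ranked candidates (Python negative-slice wraparound) and returns a non-empty
-- selection; B treats budget as a selection count and returns [], the intended value for a
-- non-positive budget.
def D_individual_feature_count_selection (budget : Int) (candidates : List (String × List String)) : Prop :=
  budget < 0 ∧ 0 < (candidates.length : Int) + budget
instance (budget : Int) (candidates : List (String × List String)) : Decidable (D_individual_feature_count_selection budget candidates) := by unfold D_individual_feature_count_selection; infer_instance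

def Spec_individual_feature_count_selection (budget : Int) (candidates : List (String × List String)) (out : List String) : Prop := ¬ D_individual_feature_count_selection budget candidates → out = individual_feature_count_selection_alt budget candidates
instance (budget : Int) (candidates : List (String × List String)) (out : List String) : Decidable (Spec_individual_feature_count_selection budget candidates out) := by unfold Spec_individual_feature_count_selection; infer_instance

def pvDiffWitness_individual_feature_count_selection : Int × (List (String × List String)) :=
  (-1, [("a", ["x"]), ("b", [])])
def pvDiffWitnessOut_individual_feature_count_selection : (List String) × (List String) :=
  (["a"], [])

-- ===== CLAIM (what is proved, stated in full; the proofs are below) =====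
def Claim_unchanged_individual_feature_count_selection : Prop := ∀ (budget : Int) (candidates : List (String × List String)), Dom_individual_feature_count_selection budget candidates → Pre_individual_feature_count_selection budget candidates → Spec_individual_feature_count_selection budget candidates (individual_feature_count_selection budget candidates)
def Claim_changed_individual_feature_count_selection : Prop := Dom_individual_feature_count_selection (pvDiffWitness_individual_feature_count_selection.1) (pvDiffWitness_individual_feature_count_selection.2) ∧ Pre_individual_feature_count_selection (pvDiffWitness_individual_feature_count_selection.1) (pvDiffWitness_individual_feature_count_selection.2) ∧ D_individual_feature_count_selection (pvDiffWitness_individual_feature_count_selection.1) (pvDiffWitness_individual_feature_count_selection.2) ∧ individual_feature_count_selection (pvDiffWitness_individual_feature_count_selection.1) (pvDiffWitness_individual_feature_count_selection.2) = pvDiffWitnessOut_individual_feature_count_selection.1 ∧ individual_feature_count_selection_alt (pvDiffWitness_individual_feature_count_selection.1) (pvDiffWitness_individual_feature_count_selection.2) = pvDiffWitnessOut_individual_feature_count_selection.2 ∧ pvDiffWitnessOut_individual_feature_count_selection.1 ≠ pvDiffWitnessOut_individual_feature_count_selection.2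
def Claim_exact_individual_feature_count_selection : Prop := ∀ (budget : Int) (candidates : List (String × List String)), Dom_individual_feature_count_selection budget candidates → Pre_individual_feature_count_selection budget candidates → D_individual_feature_count_selection budget candidates → individual_feature_count_selection budget candidates ≠ individual_feature_count_selection_alt budget candidates

-- ===== LEMMAS AND PROOFS =====

-- abbreviation used only in the proofs
def pvSz (it : String × List String) : Int := pvSetLen it.2

-- B's bucket for size s holds the ids of the candidates of size s, in input order
lemma pvBuckets_getD (cs : List (String × List String)) (s : Int) :
    (pvBuckets cs).getD s [] = (cs.filter (fun it => pvSz it == s)).map (fun it => it.1) := by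
  have h : pvBuckets cs =
      ((cs.map (fun it => (pvSz it, it.1))).foldl
        (fun d p => d.modify p.1 [] (fun v => v ++ [p.2])) PySem.Dict.empty) := by
    rw [List.foldl_map]; rfl
  rw [h, PySem.Dict.getD_foldl_modify_append, PySem.Dict.getD_empty, List.nil_append,
    List.filter_map, List.map_map]
  rfl

lemma pvBuckets_keys (cs : List (String × List String)) :
    (pvBuckets cs).keys = PySem.Set.ofList (cs.map pvSz) := by
  have h := PySem.Dict.keys_foldl_modify_key cs (fun it => pvSz it) []
    (fun _ it => (fun v => v ++ [it.1])) PySem.Dict.empty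
  simpa [PySem.Dict.keys_empty, PySem.Set.update, PySem.Set.ofList, PySem.Set.empty] using h

-- partition: flat-mapping the filters over a complete duplicate-free list of sizes is a permutation
lemma pvFlatFilterPerm (sz : (String × List String) → Int) :
    ∀ (S : List Int) (l : List (String × List String)), S.Nodup → (∀ x ∈ l, sz x ∈ S) →
      (S.flatMap (fun s => l.filter (fun x => sz x == s))).Perm l := by
  intro S
  induction S with
  | nil => intro l _ h; simp; cases l with
      | nil => rfl
      | cons a t => exact absurd (h a (by simp)) (by simp)
  | cons s rest ih =>
    intro l hnd hall
    rw [List.flatMap_cons]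
    have hs : s ∉ rest := (List.nodup_cons.mp hnd).1
    have hnd' : rest.Nodup := (List.nodup_cons.mp hnd).2
    have hcong : rest.flatMap (fun t => l.filter (fun x => sz x == t))
        = rest.flatMap (fun t => (l.filter (fun x => !(sz x == s))).filter (fun x => sz x == t)) := by
      refine List.flatMap_congr ?_
      intro t ht
      rw [List.filter_filter]
      refine (List.filter_congr ?_)
      intro x _
      have hts : t ≠ s := fun e => hs (e ▸ ht)
      by_cases hx : sz x = t
      · simp [hx, hts]
      · simp [hx]
    have hperm' : (rest.flatMap (fun t => (l.filter (fun x => !(sz x == s))).filter (fun x => sz x == t))).Perm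
        (l.filter (fun x => !(sz x == s))) := by
      refine ih _ hnd' ?_
      intro x hx
      rw [List.mem_filter] at hx
      have h1 := hall x hx.1
      have h2 := hx.2
      have h2' : sz x ≠ s := by simpa using h2
      simp only [List.mem_cons] at h1
      tauto
    rw [hcong]
    exact (List.Perm.append_left _ hperm').trans (List.filter_append_perm _ l)

-- Python's stable sort with the tuple key (k1, k2) is the sort by the lexicographic key
lemma pvSorted2_eq_sorted_lex (xs : List (String × List String))
    (k1 : (String × List String) → Int) (k2 : (String × List String) → String) :
    PySem.List.sorted2 xs k1 k2 false
      = PySem.List.sorted xs (fun x => toLex (k1 x, k2 x)) false := by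
  have hfn : (fun (a b : String × List String) => decide (k1 a < k1 b) || (!decide (k1 b < k1 a) && decide (k2 a < k2 b)))
      = (fun a b => decide ((fun x => toLex (k1 x, k2 x)) a < (fun x => toLex (k1 x, k2 x)) b)) := by
    funext a b
    simp only [Prod.Lex.lt_iff, ofLex_toLex]
    by_cases h1 : k1 a < k1 b
    · simp [h1]
    · by_cases h2 : k1 b < k1 a
      · have hne : k1 a ≠ k1 b := ne_of_gt h2
        simp [h1, h2, hne]
      · have he : k1 a = k1 b := le_antisymm (not_lt.mp h2) (not_lt.mp h1)
        simp [he]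
  simp only [PySem.List.sorted2, PySem.List.sorted, Bool.false_eq_true, if_false, hfn]

-- sorting pairs by id then projecting ids = projecting ids then sorting
lemma pvMapFst_sorted (l : List (String × List String)) :
    (PySem.List.sorted l (fun it => it.1) false).map (fun it => it.1)
      = PySem.List.sorted (l.map (fun it => it.1)) (fun x => x) false := by
  refine (PySem.List.sorted_id_eq_of_perm_of_pairwise _ _ ?_ ?_).symm
  · exact (PySem.List.sorted_perm l (fun it => it.1) false).map _
  · exact List.pairwise_map.mpr (PySem.List.sorted_pairwise l (fun it => it.1))

lemma pvPickLoop_eq (d : PySem.Dict Int (List String)) (count : Int) :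
    ∀ (S : List Int) (picked : List String),
      pvPickLoop d count S picked
        = picked ++ (S.flatMap (fun s => PySem.List.sorted (d.getD s []) (fun x => x) false)).take
            (count - (picked.length : Int)).toNat := by
  intro S
  induction S with
  | nil => intro picked; simp [pvPickLoop]
  | cons s rest ih =>
    intro picked
    rw [List.flatMap_cons]
    by_cases hc : count ≤ (picked.length : Int)
    · rw [pvPickLoop, if_pos hc]
      have : (count - (picked.length : Int)).toNat = 0 := by omega
      simp [this]
    · rw [pvPickLoop, if_neg hc]
      have hpos : (0:Int) ≤ count - (picked.length : Int) := by omega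
      show pvPickLoop d count rest (picked ++ PySem.List.slice
          (PySem.List.sorted (d.getD s []) (fun x => x) false) none
          (some (count - (picked.length : Int)))) = _
      rw [PySem.List.slice_to _ hpos, ih]
      rw [List.append_assoc, List.take_append]
      have harith : (count - (((picked ++ List.take (count - (picked.length : Int)).toNat
          (PySem.List.sorted (d.getD s []) (fun x => x) false)).length : Nat) : Int)).toNat
          = (count - (picked.length : Int)).toNat
            - (PySem.List.sorted (d.getD s []) (fun x => x) false).length := by
        simp only [List.length_append, List.length_take]
        omega
      rw [harith]

-- central equation: A's ranked ids are B's buckets flattened in (size desc, id asc) order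
lemma pvCentral (cs : List (String × List String)) (h : (cs.map Prod.fst).Nodup) :
    (PySem.List.sorted2 cs (fun it => -(pvSetLen it.2)) (fun it => it.1) false).map (fun it => it.1)
      = (PySem.List.sorted (pvBuckets cs).keys (fun x => x) true).flatMap
          (fun s => PySem.List.sorted ((pvBuckets cs).getD s []) (fun x => x) false) := by
  set S := PySem.List.sorted (pvBuckets cs).keys (fun x => x) true with hS
  set blk := fun s => PySem.List.sorted (cs.filter (fun x => pvSz x == s)) (fun it => it.1) false with hblk
  have hkeys := pvBuckets_keys cs
  have hSnd : S.Nodup := by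
    have h0 : (pvBuckets cs).keys.Nodup := by rw [hkeys]; exact PySem.Set.nodup_ofList _
    exact ((PySem.List.sorted_perm _ _ _).nodup_iff).mpr h0
  have hScomplete : ∀ x ∈ cs, pvSz x ∈ S := by
    intro x hx
    rw [hS, PySem.List.mem_sorted, hkeys, PySem.Set.mem_ofList]
    exact List.mem_map_of_mem hx
  have hSdesc : S.Pairwise (fun a b => b < a) := by
    have h1 := PySem.List.sorted_pairwise_rev (pvBuckets cs).keys (fun x => x)
    exact (h1.and hSnd).imp (fun hab => lt_of_le_of_ne hab.1 (Ne.symm hab.2))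
  have hszblk : ∀ s, ∀ x ∈ blk s, pvSz x = s := by
    intro s x hx
    rw [hblk, PySem.List.mem_sorted, List.mem_filter] at hx
    simpa using hx.2
  have hys_perm : (S.flatMap blk).Perm cs := by
    refine (List.Perm.flatMap_left S ?_).trans (pvFlatFilterPerm pvSz S cs hSnd hScomplete)
    intro s _
    exact PySem.List.sorted_perm _ _ _
  have hys_pair : (S.flatMap blk).Pairwise
      (fun a b => (fun x => toLex (-(pvSetLen x.2), x.1)) a < (fun x => toLex (-(pvSetLen x.2), x.1)) b) := by
    rw [List.flatMap_def, List.pairwise_flatten]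
    constructor
    · intro l hl
      rw [List.mem_map] at hl
      obtain ⟨s, hsS, rfl⟩ := hl
      have hle := PySem.List.sorted_pairwise (cs.filter (fun x => pvSz x == s)) (fun it => it.1)
      have hnd2 : ((blk s).map (fun it => it.1)).Nodup := by
        have hsub : ((cs.filter (fun x => pvSz x == s)).map (fun it => it.1)).Sublist (cs.map (fun it => it.1)) :=
          List.Sublist.map _ List.filter_sublist
        have hfn : ((cs.filter (fun x => pvSz x == s)).map (fun it => it.1)).Nodup := hsub.nodup h
        exact (((PySem.List.sorted_perm (cs.filter (fun x => pvSz x == s)) (fun it => it.1) false).map (fun it : String × List String => it.1)).nodup_iff).mpr hfn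
      have hne : (blk s).Pairwise (fun a b => a.1 ≠ b.1) := List.pairwise_map.mp hnd2
      refine ((hle.and hne).imp_of_mem ?_)
      intro a b ha hb hab
      rw [Prod.Lex.lt_iff]
      right
      refine ⟨?_, lt_of_le_of_ne hab.1 hab.2⟩
      have h1 := hszblk s a ha
      have h2 := hszblk s b hb
      simp only [pvSz] at h1 h2
      simp [h1, h2]
    · rw [List.pairwise_map]
      refine hSdesc.imp_of_mem ?_
      intro s1 s2 hs1 hs2 hlt x hx y hy
      rw [Prod.Lex.lt_iff]
      left
      have h1 := hszblk s1 x hx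
      have h2 := hszblk s2 y hy
      simp only [pvSz] at h1 h2
      simp only [ofLex_toLex]
      omega
  have hmain : PySem.List.sorted2 cs (fun it => -(pvSetLen it.2)) (fun it => it.1) false = S.flatMap blk := by
    rw [pvSorted2_eq_sorted_lex]
    exact PySem.List.sorted_eq_of_perm_of_pairwise_lt _ _ _ hys_perm hys_pair
  rw [hmain, List.map_flatMap]
  refine List.flatMap_congr ?_
  intro s hsS
  rw [pvBuckets_getD, ← pvMapFst_sorted]

-- A's output and B's output as takes of the same flattened id sequence
lemma pvA_eq_take (budget : Int) (candidates : List (String × List String))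
    (hpre : (candidates.map Prod.fst).Nodup) :
    individual_feature_count_selection budget candidates
      = PySem.List.sorted
          (((PySem.List.sorted (pvBuckets candidates).keys (fun x => x) true).flatMap
              (fun s => PySem.List.sorted ((pvBuckets candidates).getD s []) (fun x => x) false)).take
            (if 0 ≤ budget then budget.toNat else candidates.length - (-budget).toNat))
          (fun x => x) false := by
  show PySem.List.sorted ((PySem.List.slice (PySem.List.sorted2 candidates (fun it => -(pvSetLen it.2)) (fun it => it.1) false) none (some budget)).map (fun it => it.1)) (fun x => x) false = _
  have hlen : (PySem.List.sorted2 candidates (fun it => -(pvSetLen it.2)) (fun it => it.1) false).length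
      = candidates.length :=
    (PySem.List.sorted2_perm candidates _ _ false).length_eq
  rcases le_or_gt (0:Int) budget with hb | hb
  · rw [if_pos hb, PySem.List.slice_to _ hb, List.map_take, pvCentral candidates hpre]
  · rw [if_neg (by omega)]
    have h2 := PySem.List.slice_to_neg_natCast
      (PySem.List.sorted2 candidates (fun it => -(pvSetLen it.2)) (fun it => it.1) false)
      ((-budget).toNat) (by omega)
    rw [show -((((-budget).toNat : Nat)) : Int) = budget by omega] at h2
    rw [h2, List.map_take, pvCentral candidates hpre, hlen]

lemma pvB_eq_take (budget : Int) (candidates : List (String × List String)) :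
    individual_feature_count_selection_alt budget candidates
      = PySem.List.sorted
          (((PySem.List.sorted (pvBuckets candidates).keys (fun x => x) true).flatMap
              (fun s => PySem.List.sorted ((pvBuckets candidates).getD s []) (fun x => x) false)).take
            (max 0 (min budget (candidates.length : Int))).toNat)
          (fun x => x) false := by
  show PySem.List.sorted (pvPickLoop (pvBuckets candidates)
      (max 0 (min budget (candidates.length : Int)))
      (PySem.List.sorted (pvBuckets candidates).keys (fun x => x) true) []) (fun x => x) false = _
  rw [pvPickLoop_eq]
  simp

-- the flattened id sequence has as many ids as there are candidates
lemma pvFlat_length (candidates : List (String × List String))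
    (hpre : (candidates.map Prod.fst).Nodup) :
    ((PySem.List.sorted (pvBuckets candidates).keys (fun x => x) true).flatMap
        (fun s => PySem.List.sorted ((pvBuckets candidates).getD s []) (fun x => x) false)).length
      = candidates.length := by
  have h := congrArg List.length (pvCentral candidates hpre)
  simpa [(PySem.List.sorted2_perm candidates (fun it => -(pvSetLen it.2)) (fun it => it.1) false).length_eq] using h.symm

-- ===== VERDICT (by name: the statements are the Claim_ definitions above) =====
theorem individual_feature_count_selection_spec : Claim_unchanged_individual_feature_count_selection := by
  intro budget candidates _ hpre hnd
  have hnd' : ¬ (budget < 0 ∧ 0 < (candidates.length : Int) + budget) := hnd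
  rw [pvA_eq_take budget candidates hpre, pvB_eq_take]
  congr 1
  rcases le_or_gt (0:Int) budget with hb | hb
  · rw [if_pos hb, List.take_eq_take_iff, pvFlat_length candidates hpre]
    omega
  · rw [if_neg (by omega), List.take_eq_take_iff, pvFlat_length candidates hpre]
    omega

theorem individual_feature_count_selection_changed : Claim_changed_individual_feature_count_selection := by
  unfold Claim_changed_individual_feature_count_selection; decide

theorem individual_feature_count_selection_tight : Claim_exact_individual_feature_count_selection := by
  intro budget candidates _ hpre hd
  obtain ⟨hb, hn⟩ := hd
  rw [pvA_eq_take budget candidates hpre, pvB_eq_take]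
  intro heq
  have hlena := congrArg List.length heq
  have hperm1 := PySem.List.sorted_perm
    (((PySem.List.sorted (pvBuckets candidates).keys (fun x => x) true).flatMap
        (fun s => PySem.List.sorted ((pvBuckets candidates).getD s []) (fun x => x) false)).take
      (if 0 ≤ budget then budget.toNat else candidates.length - (-budget).toNat)) (fun x => x) false
  have hperm2 := PySem.List.sorted_perm
    (((PySem.List.sorted (pvBuckets candidates).keys (fun x => x) true).flatMap
        (fun s => PySem.List.sorted ((pvBuckets candidates).getD s []) (fun x => x) false)).take
      (max 0 (min budget (candidates.length : Int))).toNat) (fun x => x) false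
  have h1 := hperm1.length_eq
  have h2 := hperm2.length_eq
  simp only [List.length_take, pvFlat_length candidates hpre] at h1 h2
  rw [h1, h2] at hlena
  rw [if_neg (by omega)] at hlena
  omega
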